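-- pv_equiv track=rewrite | github.com/weilianlow/leetcode | hackerrank/string/test_designer_door_mat.py | designer_door_mat
-- ===== SOURCE A (Python) =====
-- def designer_door_mat(row, width):
--     pattern = list()
--     for i in range(1, int(row / 2) + 1):
--         trey = i * 2 - 1
--         hypen = int((width - trey * 3) / 2)
--         pattern.append('-' * hypen + '.|.' * trey + '-' * hypen)
--
--     welcome = ['-' * int((width - 7) / 2) + 'WELCOME' + '-' * int((width - 7) / 2)]
--     return '\n'.join(pattern + welcome + pattern[::-1])
-- ===== SOURCE B (Python) =====
-- def _mat_row(width, half, r):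
--     d = abs(r - half)
--     if d == 0:
--         hy = int((width - 7) / 2)
--         return '-' * hy + 'WELCOME' + '-' * hy
--     trey = 2 * (half - d) + 1
--     hy = int((width - trey * 3) / 2)
--     return '-' * hy + '.|.' * trey + '-' * hy
--
--
-- def designer_door_mat(row, width):
--     half = max(int(row / 2), 0)
--     return '\n'.join(_mat_row(width, half, r) for r in range(2 * half + 1))
-- ===== Notes on version B (the rewrite author's own statement) =====
-- stated objective: alternative
-- what changed: A builds the top half in a list, appends the WELCOME line and mirrors the list with pattern[::-1]; B makes one symmetric pass over all 2*(row//2)+1 rows, deriving each row's rune count from its distance to the center, with no stored half-pattern and no reversal.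
import Mathlib
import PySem

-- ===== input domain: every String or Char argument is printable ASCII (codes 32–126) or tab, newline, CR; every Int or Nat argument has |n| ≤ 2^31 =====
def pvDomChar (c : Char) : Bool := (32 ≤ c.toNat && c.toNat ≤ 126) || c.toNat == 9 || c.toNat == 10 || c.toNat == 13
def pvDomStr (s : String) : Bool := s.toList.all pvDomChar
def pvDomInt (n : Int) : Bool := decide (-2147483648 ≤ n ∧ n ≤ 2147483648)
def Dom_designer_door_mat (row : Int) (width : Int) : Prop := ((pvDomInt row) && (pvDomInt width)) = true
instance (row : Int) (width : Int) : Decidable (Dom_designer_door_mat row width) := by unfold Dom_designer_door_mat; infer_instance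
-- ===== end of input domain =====

-- B replaces A's build-half/append-welcome/mirror structure by one symmetric pass over
-- all 2*(row//2)+1 rows, deriving each row from its distance to the center (objective: alternative).

-- 's * n' for strings, as a character list ('' for n ≤ 0); exact port of Python string repetition
def pvStrMul (cs : List Char) (n : Int) : List Char := PySem.List.pyRepeat cs n

-- ===== PORT A =====
-- loop body of A: '-'*hypen + '.|.'*trey + '-'*hypen for i = 1, 2, …
def pvLineA (width : Int) (i : Int) : String :=
  let trey := i * 2 - 1
  let hypen := PySem.Int.truncdiv (width - trey * 3) 2
  String.ofList (pvStrMul ['-'] hypen ++ pvStrMul ['.', '|', '.'] trey ++ pvStrMul ['-'] hypen)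

def pvWelcomeA (width : Int) : String :=
  String.ofList (pvStrMul ['-'] (PySem.Int.truncdiv (width - 7) 2) ++ "WELCOME".toList
             ++ pvStrMul ['-'] (PySem.Int.truncdiv (width - 7) 2))

def designer_door_mat (row : Int) (width : Int) : String :=
  let pattern := (PySem.List.pyRange 1 (PySem.Int.truncdiv row 2 + 1) 1).foldl
      (fun acc i => acc ++ [pvLineA width i]) []
  let welcome := [pvWelcomeA width]
  PySem.Str.join "\n" (pattern ++ welcome ++ ((PySem.List.slice? pattern none none (-1)).getD []))

-- ===== PORT B =====
-- _mat_row(width, half, r): the row at distance d = |r - half| from the center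
def pvMatRowB (width : Int) (half : Int) (r : Int) : String :=
  let d := |r - half|
  if d == 0 then
    let hy := PySem.Int.truncdiv (width - 7) 2
    String.ofList (pvStrMul ['-'] hy ++ "WELCOME".toList ++ pvStrMul ['-'] hy)
  else
    let trey := 2 * (half - d) + 1
    let hy := PySem.Int.truncdiv (width - trey * 3) 2
    String.ofList (pvStrMul ['-'] hy ++ pvStrMul ['.', '|', '.'] trey ++ pvStrMul ['-'] hy)

def designer_door_mat_alt (row : Int) (width : Int) : String :=
  let half := max (PySem.Int.truncdiv row 2) 0
  PySem.Str.join "\n" ((PySem.List.pyRange 0 (2 * half + 1) 1).map (pvMatRowB width half))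

-- ===== PRECONDITION & SPEC =====
def Spec_designer_door_mat (row : Int) (width : Int) (out : String) : Prop := out = designer_door_mat_alt row width
instance (row : Int) (width : Int) (out : String) : Decidable (Spec_designer_door_mat row width out) := by unfold Spec_designer_door_mat; infer_instance

-- ===== CLAIM (what is proved, stated in full; the proofs are below) =====
def Claim_equal_designer_door_mat : Prop := ∀ (row : Int) (width : Int), Dom_designer_door_mat row width → Spec_designer_door_mat row width (designer_door_mat row width)

-- ===== LEMMAS AND PROOFS =====

-- the center row of B is A's welcome line
theorem pvMatRowB_center (w h : Int) : pvMatRowB w h h = pvWelcomeA w := by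
  simp [pvMatRowB, pvWelcomeA]

-- off-center, B's row at distance d is A's line with i = h - d + 1
theorem pvMatRowB_off (w h r : Int) (hne : r ≠ h) :
    pvMatRowB w h r = pvLineA w (h - |r - h| + 1) := by
  have hd : ¬ (|r - h| == 0) = true := by
    simp [abs_eq_zero, sub_eq_zero, hne]
  have harg : (h - |r - h| + 1) * 2 - 1 = 2 * (h - |r - h|) + 1 := by ring
  simp only [pvMatRowB, pvLineA, if_neg hd, harg]

-- the decreasing half of B equals the reverse of A's pattern
theorem pvRev (w : Int) (n : Nat) :
    (List.range n).map (fun (k : Nat) => pvLineA w ((n : Int) - (k : Int))) =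
      ((List.range n).map (fun (k : Nat) => pvLineA w ((k : Int) + 1))).reverse := by
  induction n with
  | zero => simp
  | succ n ih =>
    conv_lhs => rw [List.range_succ_eq_map]
    conv_rhs => rw [List.range_succ, List.map_append, List.map_singleton,
      List.reverse_append, List.reverse_singleton, List.singleton_append]
    rw [List.map_cons, List.map_map]
    refine List.cons_eq_cons.mpr ⟨?_, ?_⟩
    · show pvLineA w (((n + 1 : Nat) : Int) - ((0 : Nat) : Int)) = _
      have h0 : ((n + 1 : Nat) : Int) - ((0 : Nat) : Int) = (n : Int) + 1 := by push_cast; ring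
      rw [h0]
    · rw [← ih]
      apply List.map_congr_left
      intro k _
      simp only [Function.comp_apply]
      congr 1
      push_cast
      ring

-- core: one symmetric pass over 2n+1 rows is pattern ++ welcome ++ reverse pattern
theorem pvKey (w : Int) (n : Nat) :
    (List.range (2 * n + 1)).map (fun (k : Nat) => pvMatRowB w (n : Int) (k : Int)) =
      (List.range n).map (fun (k : Nat) => pvLineA w ((k : Int) + 1)) ++ [pvWelcomeA w] ++
        ((List.range n).map (fun (k : Nat) => pvLineA w ((k : Int) + 1))).reverse := by
  have hsplit : 2 * n + 1 = (n + 1) + n := by omega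
  rw [hsplit, List.range_add, List.range_succ, List.map_append, List.map_append,
    List.map_singleton, List.map_map]
  congr 1
  congr 1
  · apply List.map_congr_left
    intro k hk
    have hk' : k < n := List.mem_range.mp hk
    have hne : (k : Int) ≠ (n : Int) := by
      intro h
      omega
    rw [pvMatRowB_off w _ _ hne]
    have habs : |(k : Int) - (n : Int)| = (n : Int) - (k : Int) := by
      rw [abs_sub_comm]
      exact abs_of_nonneg (by omega)
    rw [habs]
    congr 1
    ring
  · rw [pvMatRowB_center]
  · rw [← pvRev w n]
    apply List.map_congr_left
    intro k _
    simp only [Function.comp_apply]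
    have hne : ((n + 1 + k : Nat) : Int) ≠ (n : Int) := by omega
    rw [pvMatRowB_off w _ _ hne]
    have habs : |((n + 1 + k : Nat) : Int) - (n : Int)| = (k : Int) + 1 := by
      rw [abs_of_nonneg (by push_cast; omega)]
      push_cast
      ring
    rw [habs]
    congr 1
    ring

-- ===== VERDICT (by name: the statement is the Claim_ definition above) =====
theorem designer_door_mat_spec : Claim_equal_designer_door_mat := by
  intro row width _
  show designer_door_mat row width = designer_door_mat_alt row width
  simp only [designer_door_mat, designer_door_mat_alt]
  rw [PySem.List.foldl_append_singleton_eq_map, List.nil_append,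
    PySem.List.slice?_none_none_neg_one, Option.getD_some]
  rw [show max (PySem.Int.truncdiv row 2) 0 = ((PySem.Int.truncdiv row 2).toNat : Int) from
    (Int.ofNat_toNat _).symm]
  rw [PySem.List.pyRange_one]
  rw [show (PySem.Int.truncdiv row 2 + 1 - 1).toNat = (PySem.Int.truncdiv row 2).toNat from by omega]
  rw [show (2 : Int) * ((PySem.Int.truncdiv row 2).toNat : Int) + 1 =
      ((2 * (PySem.Int.truncdiv row 2).toNat + 1 : Nat) : Int) from by push_cast; ring]
  rw [PySem.List.pyRange_zero_natCast, List.map_map, List.map_map]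
  apply congrArg
  simp only [Function.comp_def]
  rw [pvKey]
  have hcomm : (fun (k : Nat) => pvLineA width (1 + (k : Int))) =
      (fun (k : Nat) => pvLineA width ((k : Int) + 1)) := by
    funext k
    rw [add_comm]
  rw [hcomm]
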